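-- pv_equiv track=rewrite | github.com/QuikZiHao/Google-Kick-Start | 2021 Round H/Painter.py | addColor
-- ===== SOURCE A (Python) =====
-- def addColor(needed,num):
--     move=0
--     gotColor=False
--     for i in needed:
--         if(i[num]=="1"):
--             if(gotColor):
--                 move = move - 1
--             gotColor=True
--         else:
--             gotColor=False
--         if(gotColor):
--             move = move + 1
--     return move
-- ===== SOURCE B (Python) =====
-- def addColor(needed, num):
--     col = [row[num] for row in needed]
--     ones = col.count("1")
--     joins = sum(1 for a, b in zip(col, col[1:]) if a == "1" and b == "1")
--     return ones - joins
-- ===== Notes on version B (the rewrite author's own statement) =====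
-- stated objective: alternative
-- what changed: Replaces A's running gotColor flag with the counting identity runs = (#'1' cells) - (#adjacent '1','1' pairs), computed as two counts over the materialized column and its zip with its own tail.
import Mathlib
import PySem

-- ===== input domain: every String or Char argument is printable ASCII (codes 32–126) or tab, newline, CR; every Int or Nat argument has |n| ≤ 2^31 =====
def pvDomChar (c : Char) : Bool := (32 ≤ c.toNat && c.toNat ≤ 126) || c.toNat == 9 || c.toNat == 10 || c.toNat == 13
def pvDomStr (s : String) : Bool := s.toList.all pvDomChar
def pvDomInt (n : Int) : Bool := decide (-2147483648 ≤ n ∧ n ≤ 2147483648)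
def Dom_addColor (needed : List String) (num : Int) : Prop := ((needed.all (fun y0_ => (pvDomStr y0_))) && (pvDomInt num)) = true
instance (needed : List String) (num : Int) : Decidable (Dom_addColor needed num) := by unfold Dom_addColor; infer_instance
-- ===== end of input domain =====

-- B replaces A's running gotColor flag by the counting identity
-- runs = (#'1' cells) − (#adjacent '1','1' pairs), two counts over the materialized column
-- (objective: alternative).

-- ===== PORT A =====
-- A's loop; `none` from pyGet? is an IndexError in Python (excluded by Pre_), loop stops there.
def addColorLoop (num : Int) : List String → Int → Bool → Int
  | [], move, _ => move
  | s :: rest, move, gotColor =>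
    match PySem.Str.pyGet? s num with
    | none => move
    | some c =>
      if c = '1' then
        addColorLoop num rest ((if gotColor then move - 1 else move) + 1) true
      else
        addColorLoop num rest move false

def addColor (needed : List String) (num : Int) : Int :=
  addColorLoop num needed 0 false

-- ===== PORT B =====
def addColor_alt (needed : List String) (num : Int) : Int :=
  let col : List Char := needed.filterMap (fun row => PySem.Str.pyGet? row num)
  let ones : Int := (col.countP (fun c => c == '1') : Int)
  let joins : Int := ((col.zip col.tail).countP (fun p => p.1 == '1' && p.2 == '1') : Int)
  ones - joins

-- ===== PRECONDITION & SPEC =====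
-- Pre_: every row admits index num (Python raises IndexError otherwise).
def Pre_addColor (needed : List String) (num : Int) : Prop :=
  ∀ s ∈ needed, PySem.Raise.InRange s.toList.length num
instance (needed : List String) (num : Int) : Decidable (Pre_addColor needed num) := by
  unfold Pre_addColor; infer_instance
def pvWitness_addColor : List String × Int := (["1", "0", "1"], 0)

def Spec_addColor (needed : List String) (num : Int) (out : Int) : Prop := out = addColor_alt needed num
instance (needed : List String) (num : Int) (out : Int) : Decidable (Spec_addColor needed num out) := by unfold Spec_addColor; infer_instance

-- ===== CLAIM (what is proved, stated in full; the proofs are below) =====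
def Claim_equal_addColor : Prop := ∀ (needed : List String) (num : Int), Dom_addColor needed num → Pre_addColor needed num → Spec_addColor needed num (addColor needed num)

-- ===== LEMMAS AND PROOFS =====

-- A's loop restated over the materialized column.
def cntLoop : List Char → Int → Bool → Int
  | [], move, _ => move
  | c :: rest, move, gotColor =>
    if c = '1' then
      cntLoop rest ((if gotColor then move - 1 else move) + 1) true
    else
      cntLoop rest move false

-- B's value on a column.
def bval (l : List Char) : Int :=
  (l.countP (fun c => c == '1') : Int) -
    ((l.zip l.tail).countP (fun p => p.1 == '1' && p.2 == '1') : Int)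

def hd1 : List Char → Int
  | [] => 0
  | c :: _ => if c = '1' then 1 else 0

theorem addColorLoop_eq_cntLoop (num : Int) (needed : List String)
    (h : ∀ s ∈ needed, PySem.Raise.InRange s.toList.length num) :
    ∀ move gotColor, addColorLoop num needed move gotColor =
      cntLoop (needed.filterMap (fun row => PySem.Str.pyGet? row num)) move gotColor := by
  induction needed with
  | nil => intro move got; simp [addColorLoop, cntLoop]
  | cons s rest ih =>
    intro move got
    have hs : PySem.Raise.InRange s.toList.length num := h s (by simp)
    obtain ⟨c, hc⟩ : ∃ c, PySem.Str.pyGet? s num = some c := by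
      cases hp : PySem.Str.pyGet? s num with
      | none =>
        exfalso
        have : PySem.List.pyGet? s.toList num = none := by simpa using hp
        exact ((PySem.List.pyGet?_eq_none_iff s.toList num).mp this) hs
      | some c => exact ⟨c, rfl⟩
    have hrest : ∀ t ∈ rest, PySem.Raise.InRange t.toList.length num :=
      fun t ht => h t (by simp [ht])
    simp only [addColorLoop, hc, List.filterMap_cons, cntLoop]
    by_cases h1 : c = '1' <;> simp [h1, ih hrest]

theorem bval_cons (c : Char) (rest : List Char) :
    bval (c :: rest) =
      bval rest + (if c = '1' then 1 else 0) - (if c = '1' then hd1 rest else 0) := by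
  cases rest with
  | nil => by_cases h1 : c = '1' <;> simp [bval, hd1, h1]
  | cons d t =>
    by_cases h1 : c = '1' <;> by_cases h2 : d = '1' <;>
      simp [bval, hd1, h1, h2, List.zip] <;> ring

theorem cntLoop_eq_bval (l : List Char) :
    ∀ move got, cntLoop l move got = move + bval l - (if got then hd1 l else 0) := by
  induction l with
  | nil => intro move got; simp [cntLoop, bval, hd1]
  | cons c rest ih =>
    intro move got
    by_cases h1 : c = '1'
    · cases got <;>
        simp only [cntLoop, if_pos h1, ih, bval_cons, hd1, if_pos h1] <;> simp <;> ring
    · simp only [cntLoop, if_neg h1, ih, bval_cons, hd1, if_neg h1]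
      cases got <;> simp

-- ===== VERDICT (by name: the statement is the Claim_ definition above) =====
theorem addColor_spec : Claim_equal_addColor := by
  intro needed num _hdom hpre
  unfold Spec_addColor addColor addColor_alt
  rw [addColorLoop_eq_cntLoop num needed hpre 0 false]
  have := cntLoop_eq_bval (needed.filterMap (fun row => PySem.Str.pyGet? row num)) 0 false
  simpa [bval] using this
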